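/- GENERATED by mk_final_copies.py from the proof of the farm's unit `start_decoder.C2` (farm:start_decoder.C2.2: Proof.lean) as the
   re-elaboration sweep compiled it — do not edit. -/
import Vorbis.Spec.Units.start_decoder_C2
import Vorbis.Spec.Worked.start_decoder_C2_Lemmas

/-- Segment C2 of `start_decoder` (the head of the codebook loop, 0x114298 … 0x114410 + 0x114439 … 0x1144e9): the lemmas per call return are in
`Lemmas.lean`, composed in `Vorbis.Spec.start_decoder_C2.seg_c2`. -/
theorem Vorbis.Spec.Worked.start_decoder_C2_ok : Vorbis.Spec.start_decoder_C2.Statement := by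
  intro Lay hLay μ hμ u₀ hcode hld4 hld8 h_get_bits hst4 hst1 h_tmalloc h_error h_malloc hst8
  exact Vorbis.Spec.start_decoder_C2.seg_c2 hLay hμ hcode hld4 hld8 h_get_bits hst4 hst1 h_tmalloc h_error h_malloc hst8
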